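-- pv_equiv track=rewrite | github.com/miliar/Code_Jam_Webscraper | solutions_python/solutions_year16_round1_nr1/1598.py | getLastWord
-- ===== SOURCE A (Python) =====
-- def getLastWord( input ):
-- 	last = 0
-- 	output = []
-- 	output.append(input[0])
-- 	for i in range(1, len(input)):
-- 		pos = findPos(input[i], output)
-- 		output.insert(pos, input[i])
-- 	return ''.join(output)
--
-- def findPos(letter, list):
-- 	if letter >= list[0]:
-- 		return 0
-- 	else:
-- 		return len(list)
-- ===== SOURCE B (Python) =====
-- def getLastWord(input):
--     m = input[0]
--     left = []
--     right = []
--     for c in input[1:]: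
--         if c >= m:
--             left.append(c)
--             m = c
--         else:
--             right.append(c)
--     return ''.join(reversed(left)) + input[0] + ''.join(right)
-- ===== Notes on version B (the rewrite author's own statement) =====
-- stated objective: faster
-- what changed: B replaces A's repeated list.insert at a computed position (and the findPos helper reading output[0]) with a running maximum and two plain append-only accumulators (front-inserts and back-appends), assembling the string once at the end; correct because A's output[0] is always the running maximum.
import Mathlib
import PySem

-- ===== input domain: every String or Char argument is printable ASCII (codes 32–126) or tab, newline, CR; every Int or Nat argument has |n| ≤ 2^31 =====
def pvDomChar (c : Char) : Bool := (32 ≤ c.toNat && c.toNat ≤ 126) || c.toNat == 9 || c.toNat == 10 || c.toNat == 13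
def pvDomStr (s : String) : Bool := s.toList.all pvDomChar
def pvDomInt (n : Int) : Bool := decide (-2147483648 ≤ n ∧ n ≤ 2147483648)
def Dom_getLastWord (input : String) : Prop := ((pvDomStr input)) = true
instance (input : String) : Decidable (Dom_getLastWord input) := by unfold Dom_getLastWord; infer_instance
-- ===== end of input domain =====

-- B replaces A's repeated positional list.insert (via findPos reading output[0]) with a running
-- maximum and two plain accumulators, assembling the result once; equivalence proved on nonempty input.


-- ===== PORT A =====
-- findPos(letter, list): list[0] is always in range where A calls it (output is nonempty);
-- pyGetD's default is never read under Pre_.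
def pvFindPos (letter : Char) (list : List Char) : Int :=
  if PySem.List.pyGetD list 0 letter ≤ letter then 0 else (list.length : Int)

def getLastWord (input : String) : String :=
  let chars := input.toList
  -- output = [input[0]]; input[0] raises IndexError on "" — excluded by Pre_
  let output : List Char := [PySem.List.pyGetD chars 0 ' ']
  let output := (PySem.List.pyRange 1 (chars.length : Int) 1).foldl
    (fun out i =>
      let c := PySem.List.pyGetD chars i ' '
      PySem.List.insert out (pvFindPos c out) c) output
  String.ofList output

-- ===== PORT B =====
def getLastWord_alt (input : String) : String :=
  match input.toList with
  | [] => ""   -- unreachable under Pre_: the Python B raises IndexError on ""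
  | h :: rest =>
    let s := rest.foldl
      (fun (s : Char × List Char × List Char) c =>
        if s.1 ≤ c then (c, s.2.1 ++ [c], s.2.2) else (s.1, s.2.1, s.2.2 ++ [c]))
      (h, [], [])
    String.ofList (s.2.1.reverse ++ h :: s.2.2)

-- ===== PRECONDITION & SPEC =====
-- Pre_ excludes only the empty string, on which A (input[0]) raises IndexError.
def Pre_getLastWord (input : String) : Prop := input ≠ ""
instance (input : String) : Decidable (Pre_getLastWord input) := by unfold Pre_getLastWord; infer_instance
def pvWitness_getLastWord : String := "ba"

def Spec_getLastWord (input : String) (out : String) : Prop := out = getLastWord_alt input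
instance (input : String) (out : String) : Decidable (Spec_getLastWord input out) := by unfold Spec_getLastWord; infer_instance

-- ===== CLAIM (what is proved, stated in full; the proofs are below) =====
def Claim_equal_getLastWord : Prop := ∀ (input : String), Dom_getLastWord input → Pre_getLastWord input → Spec_getLastWord input (getLastWord input)

-- ===== LEMMAS AND PROOFS =====

-- A's loop step on a nonempty output whose head is m
theorem stepA_eq (m c : Char) (t : List Char) :
    PySem.List.insert (m :: t) (pvFindPos c (m :: t)) c
      = if m ≤ c then c :: m :: t else (m :: t) ++ [c] := by
  by_cases h : m ≤ c
  · simp [pvFindPos, PySem.List.pyGetD, PySem.List.pyGet?, PySem.List.pyIdx?, h,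
      PySem.List.insert_zero]
  · have hpos : pvFindPos c (m :: t) = (((t.length + 1 : Nat)) : Int) := by
      simp [pvFindPos, PySem.List.pyGetD, PySem.List.pyGet?, PySem.List.pyIdx?, h]
    rw [hpos, PySem.List.insert_natCast _ _ _ (by simp)]
    simp [h]

-- loop invariant: A's state is l.reverse ++ h :: r, its head is B's running max m
theorem loop_inv : ∀ (cs : List Char) (h m : Char) (l r : List Char),
    (l.reverse ++ h :: r).head? = some m →
    cs.foldl (fun out c => PySem.List.insert out (pvFindPos c out) c) (l.reverse ++ h :: r)
      = (fun s : Char × List Char × List Char => s.2.1.reverse ++ h :: s.2.2)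
        (cs.foldl
          (fun (s : Char × List Char × List Char) c =>
            if s.1 ≤ c then (c, s.2.1 ++ [c], s.2.2) else (s.1, s.2.1, s.2.2 ++ [c]))
          (m, l, r)) := by
  intro cs
  induction cs with
  | nil => intro h m l r _; rfl
  | cons c cs ih =>
    intro h m l r hm
    obtain ⟨t, ht⟩ : ∃ t, l.reverse ++ h :: r = m :: t := by
      cases hl : l.reverse with
      | nil => refine ⟨r, ?_⟩; simp [hl] at hm ⊢; simp [hm]
      | cons a u => refine ⟨u ++ h :: r, ?_⟩; simp [hl] at hm ⊢; simp [hm]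
    simp only [List.foldl_cons]
    rw [ht, stepA_eq]
    by_cases hc : m ≤ c
    · have h1 : c :: m :: t = (l ++ [c]).reverse ++ h :: r := by
        simp [ht.symm]
      have h2 : ((l ++ [c]).reverse ++ h :: r).head? = some c := by simp
      simpa [hc, h1] using ih h c (l ++ [c]) r h2
    · have h1 : (m :: t) ++ [c] = l.reverse ++ h :: (r ++ [c]) := by
        simp [ht.symm]
      have h2 : (l.reverse ++ h :: (r ++ [c])).head? = some m := by
        cases hl : l.reverse with
        | nil => simp [hl] at hm ⊢; simpa [hl] using hm
        | cons a u => simp [hl] at hm ⊢; simpa [hl] using hm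
      simpa [hc, h1] using ih h m l (r ++ [c]) h2

-- ===== VERDICT (by name: the statement is the Claim_ definition above) =====
theorem getLastWord_spec : Claim_equal_getLastWord := by
  intro input _ hpre
  have hne : input.toList ≠ [] := by simp_all [String.toList_eq_nil_iff, Pre_getLastWord]
  unfold Spec_getLastWord getLastWord getLastWord_alt
  cases hc : input.toList with
  | nil => exact absurd hc hne
  | cons h rest =>
    have hfold := PySem.List.foldl_pyRange_pyGetD' (xs := h :: rest) (a := 1) (d := ' ')
      (f := fun out c => PySem.List.insert out (pvFindPos c out) c)
      (init := [PySem.List.pyGetD (h :: rest) 0 ' ']) (by norm_num)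
    have hinit : PySem.List.pyGetD (h :: rest) (0 : Int) ' ' = h := by
      simp [PySem.List.pyGetD, PySem.List.pyGet?, PySem.List.pyIdx?]
    have hinv := loop_inv rest h h [] [] (by simp)
    simp only [hinit] at hfold ⊢
    rw [hfold]
    simp only [Int.toNat_one, List.drop_succ_cons, List.drop_zero]
    rw [show [h] = ([] : List Char).reverse ++ h :: [] from rfl, hinv]
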